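-- pv_equiv track=rewrite | github.com/satpyscene/NNLBL_test | NNLBL_src/NNLBL_main.py | validate_single_molecule_iso_list
-- ===== SOURCE A (Python) =====
-- def validate_single_molecule_iso_list(global_iso_ids):
--     """
--     检查 target_iso_list 是否只包含同一种分子的同位素编号
--     """
--     TOP7_ISO_TABLE = {
--         "H2O": [1, 2, 3, 4, 5, 6, 129],
--         "CO2": [7, 8, 9, 10, 11, 12, 13, 14],
--         "O3": [16, 17, 18, 19, 20],
--         "N2O": [21, 22, 23, 24, 25],
--         "CO": [26, 27, 28, 29, 30, 31],
--         "CH4": [32, 33, 34, 35],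
--         "O2": [36, 37, 38],
--     }
--
--     if not global_iso_ids:
--         raise ValueError("❌ target_iso_list 不能为空")
--
--     found_molecules = set()
--
--     for gid in global_iso_ids:
--         matched = False
--         for mol, iso_list in TOP7_ISO_TABLE.items():
--             if gid in iso_list:
--                 found_molecules.add(mol)
--                 matched = True
--                 break
--         if not matched:
--             raise ValueError(f"❌ 同位素编号 {gid} 不在支持的 TOP7 分子表中")
--
--     if len(found_molecules) > 1:
--         raise ValueError(
--             f"❌ 不允许混合不同分子的同位素编号: 检测到 {sorted(found_molecules)}"
--         )
--
--     # 返回分子名，供需要时使用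
--     return next(iter(found_molecules))
-- ===== SOURCE B (Python) =====
-- def validate_single_molecule_iso_list(global_iso_ids):
--     """
--     检查 target_iso_list 是否只包含同一种分子的同位素编号
--     """
--     TOP7_ISO_TABLE = {
--         "H2O": [1, 2, 3, 4, 5, 6, 129],
--         "CO2": [7, 8, 9, 10, 11, 12, 13, 14],
--         "O3": [16, 17, 18, 19, 20],
--         "N2O": [21, 22, 23, 24, 25],
--         "CO": [26, 27, 28, 29, 30, 31],
--         "CH4": [32, 33, 34, 35],
--         "O2": [36, 37, 38],
--     }
--
--     if not global_iso_ids: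
--         raise ValueError("❌ target_iso_list 不能为空")
--
--     # reverse index: iso id -> molecule name, built once
--     iso_to_mol = {i: mol for mol, isos in TOP7_ISO_TABLE.items() for i in isos}
--
--     for gid in global_iso_ids:
--         if gid not in iso_to_mol:
--             raise ValueError(f"❌ 同位素编号 {gid} 不在支持的 TOP7 分子表中")
--
--     molecules = {iso_to_mol[g] for g in global_iso_ids}
--     if len(molecules) > 1:
--         raise ValueError(
--             f"❌ 不允许混合不同分子的同位素编号: 检测到 {sorted(molecules)}"
--         )
--
--     return iso_to_mol[global_iso_ids[0]]
-- ===== Notes on version B (the rewrite author's own statement) =====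
-- stated objective: simpler
-- what changed: B builds a reverse index iso->molecule once and then makes flat passes over the id list (membership check, set comprehension, direct lookup of the first id's molecule), instead of A's per-id nested rescan of the TOP7 table with a matched flag and set iteration via next(iter(...)).
import Mathlib
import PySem

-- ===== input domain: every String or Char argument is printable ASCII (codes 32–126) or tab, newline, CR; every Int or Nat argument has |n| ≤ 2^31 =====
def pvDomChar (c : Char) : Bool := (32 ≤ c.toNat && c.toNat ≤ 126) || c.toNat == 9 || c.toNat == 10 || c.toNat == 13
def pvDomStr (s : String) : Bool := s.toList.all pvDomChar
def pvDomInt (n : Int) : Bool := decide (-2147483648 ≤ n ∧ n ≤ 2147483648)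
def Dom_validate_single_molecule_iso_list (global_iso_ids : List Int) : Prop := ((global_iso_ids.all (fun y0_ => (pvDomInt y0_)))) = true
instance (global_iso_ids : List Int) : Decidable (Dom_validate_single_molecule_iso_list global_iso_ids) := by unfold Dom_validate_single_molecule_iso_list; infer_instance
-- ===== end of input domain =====

-- B replaces A's per-id rescan of the TOP7 table by a reverse index built once plus flat
-- passes over the id list (objective: simpler). A raises ValueError on empty, unsupported
-- or mixed-molecule input; those inputs are outside Pre_ and the ports return "" there.

-- ===== PORT A =====
def pvTOP7 : List (String × List Int) :=
  [("H2O", [1, 2, 3, 4, 5, 6, 129]),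
   ("CO2", [7, 8, 9, 10, 11, 12, 13, 14]),
   ("O3", [16, 17, 18, 19, 20]),
   ("N2O", [21, 22, 23, 24, 25]),
   ("CO", [26, 27, 28, 29, 30, 31]),
   ("CH4", [32, 33, 34, 35]),
   ("O2", [36, 37, 38])]

-- inner loop of A: scan the table rows, first row containing gid wins (the 'break')
def pvScanTable (gid : Int) : List (String × List Int) → Option String
  | [] => none
  | (mol, iso_list) :: rest =>
      if iso_list.contains gid then some mol else pvScanTable gid rest

-- outer loop of A: accumulate found_molecules; none = the 'not matched' ValueError
def pvLoopA : List Int → PySem.Set String → Option (PySem.Set String)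
  | [], s => some s
  | gid :: rest, s =>
      match pvScanTable gid pvTOP7 with
      | some mol => pvLoopA rest (PySem.Set.add s mol)
      | none => none

def validate_single_molecule_iso_list (global_iso_ids : List Int) : String :=
  if global_iso_ids.isEmpty then ""   -- A: raise ValueError (excluded by Pre_)
  else
    match pvLoopA global_iso_ids PySem.Set.empty with
    | none => ""                      -- A: raise ValueError (excluded by Pre_)
    | some found =>
        if PySem.Set.len found > 1 then ""   -- A: raise ValueError (excluded by Pre_)
        else (found.head?).getD ""    -- next(iter(found)) on the singleton set

-- ===== PORT B =====
-- reverse index {i: mol for mol, isos in TOP7.items() for i in isos}, built once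
def pvRevIndex : PySem.Dict Int String :=
  pvTOP7.foldl (fun d p => p.2.foldl (fun d i => d.insert i p.1) d) PySem.Dict.empty

def validate_single_molecule_iso_list_alt (global_iso_ids : List Int) : String :=
  if global_iso_ids.isEmpty then ""   -- B: raise ValueError (excluded by Pre_)
  else if global_iso_ids.all (fun gid => pvRevIndex.contains gid) then
    let molecules : PySem.Set String :=
      PySem.Set.ofList (global_iso_ids.map (fun g => (pvRevIndex.get? g).getD ""))
    if PySem.Set.len molecules > 1 then ""   -- B: raise ValueError (excluded by Pre_)
    else (pvRevIndex.get? (global_iso_ids.headD 0)).getD ""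
  else ""                              -- B: raise ValueError (excluded by Pre_)

-- ===== PRECONDITION & SPEC =====
-- flat iso-id → molecule table, in A's scan order (used only by Pre_, not by the ports)
def pvIsoMol : List (Int × String) :=
  [((1 : Int), "H2O"), ((2 : Int), "H2O"), ((3 : Int), "H2O"), ((4 : Int), "H2O"), ((5 : Int), "H2O"), ((6 : Int), "H2O"), ((129 : Int), "H2O"), ((7 : Int), "CO2"), ((8 : Int), "CO2"), ((9 : Int), "CO2"), ((10 : Int), "CO2"), ((11 : Int), "CO2"), ((12 : Int), "CO2"), ((13 : Int), "CO2"), ((14 : Int), "CO2"), ((16 : Int), "O3"), ((17 : Int), "O3"), ((18 : Int), "O3"), ((19 : Int), "O3"), ((20 : Int), "O3"), ((21 : Int), "N2O"), ((22 : Int), "N2O"), ((23 : Int), "N2O"), ((24 : Int), "N2O"), ((25 : Int), "N2O"), ((26 : Int), "CO"), ((27 : Int), "CO"), ((28 : Int), "CO"), ((29 : Int), "CO"), ((30 : Int), "CO"), ((31 : Int), "CO"), ((32 : Int), "CH4"), ((33 : Int), "CH4"), ((34 : Int), "CH4"), ((35 : Int), "CH4"), ((36 : Int), "O2"), ((37 :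 Int), "O2"), ((38 : Int), "O2")]

-- Pre_ excludes exactly the inputs on which A raises ValueError: the empty list, lists
-- containing an iso id outside the TOP7 table, and lists mixing ids of two molecules.
def Pre_validate_single_molecule_iso_list (global_iso_ids : List Int) : Prop :=
  global_iso_ids ≠ [] ∧
  (pvIsoMol.lookup (global_iso_ids.headD 0)).isSome = true ∧
  ∀ g ∈ global_iso_ids, pvIsoMol.lookup g = pvIsoMol.lookup (global_iso_ids.headD 0)

instance (global_iso_ids : List Int) : Decidable (Pre_validate_single_molecule_iso_list global_iso_ids) := by
  unfold Pre_validate_single_molecule_iso_list; infer_instance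

def pvWitness_validate_single_molecule_iso_list : List Int := [1, 2, 129]

def Spec_validate_single_molecule_iso_list (global_iso_ids : List Int) (out : String) : Prop := out = validate_single_molecule_iso_list_alt global_iso_ids
instance (global_iso_ids : List Int) (out : String) : Decidable (Spec_validate_single_molecule_iso_list global_iso_ids out) := by unfold Spec_validate_single_molecule_iso_list; infer_instance

-- ===== CLAIM (what is proved, stated in full; the proofs are below) =====
def Claim_equal_validate_single_molecule_iso_list : Prop := ∀ (global_iso_ids : List Int), Dom_validate_single_molecule_iso_list global_iso_ids → Pre_validate_single_molecule_iso_list global_iso_ids → Spec_validate_single_molecule_iso_list global_iso_ids (validate_single_molecule_iso_list global_iso_ids)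

-- ===== LEMMAS AND PROOFS =====

-- a successful lookup key is in the table's key list
theorem pv_mem_of_lookup_some {α β : Type} [BEq α] [LawfulBEq α] (l : List (α × β)) (a : α) (b : β)
    (h : l.lookup a = some b) : a ∈ l.map Prod.fst := by
  induction l with
  | nil => simp [List.lookup] at h
  | cons p rest ih =>
      obtain ⟨k, v⟩ := p
      rw [List.lookup_cons] at h
      by_cases hb : a == k
      · simp [eq_of_beq hb]
      · simp only [hb] at h
        exact List.mem_cons_of_mem _ (ih h)

-- on every key of the flat table, both ports' lookups agree with pvIsoMol.lookup
set_option maxRecDepth 8192 in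
theorem pv_table_agree :
    (pvIsoMol.map Prod.fst).all
      (fun g => decide (pvScanTable g pvTOP7 = pvIsoMol.lookup g)
        && decide (pvRevIndex.get? g = pvIsoMol.lookup g)) = true := by decide

theorem pv_scan_eq_lookup (g : Int) (m : String) (h : pvIsoMol.lookup g = some m) :
    pvScanTable g pvTOP7 = some m := by
  have hmem := pv_mem_of_lookup_some pvIsoMol g m h
  have := List.all_eq_true.mp pv_table_agree g (by simpa using hmem)
  have h1 := (Bool.and_eq_true _ _).mp this |>.1
  rw [of_decide_eq_true h1, h]

theorem pv_get_eq_lookup (g : Int) (m : String) (h : pvIsoMol.lookup g = some m) :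
    pvRevIndex.get? g = some m := by
  have hmem := pv_mem_of_lookup_some pvIsoMol g m h
  have := List.all_eq_true.mp pv_table_agree g (by simpa using hmem)
  have h2 := (Bool.and_eq_true _ _).mp this |>.2
  rw [of_decide_eq_true h2, h]

-- A's loop over ids all mapping to m, starting from a set already containing m, is a no-op
theorem pv_loopA_const (m : String) (ids : List Int)
    (hall : ∀ g ∈ ids, pvIsoMol.lookup g = some m) (s : PySem.Set String) (hm : m ∈ s) :
    pvLoopA ids s = some s := by
  induction ids with
  | nil => rfl
  | cons g rest ih =>
      have hg := hall g (by simp)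
      simp only [pvLoopA, pv_scan_eq_lookup g m hg, PySem.Set.add_of_mem hm]
      exact ih (fun g' hg' => hall g' (List.mem_cons_of_mem _ hg'))

-- set of a constant nonempty list is the singleton
theorem pv_ofList_const (m : String) (ids : List Int) (h : ids ≠ []) :
    PySem.Set.ofList (ids.map (fun _ => m)) = [m] := by
  induction ids with
  | nil => exact absurd rfl h
  | cons g rest ih =>
      rcases rest with _ | ⟨g', rest'⟩
      · rfl
      · simp only [List.map_cons] at ih ⊢
        rw [PySem.Set.ofList_cons, ih (by simp)]
        simp [PySem.Set.discard]

-- ===== VERDICT (by name: the statement is the Claim_ definition above) =====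
theorem validate_single_molecule_iso_list_spec : Claim_equal_validate_single_molecule_iso_list := by
  intro ids _ hpre
  obtain ⟨hne, hsome, hall⟩ := hpre
  obtain ⟨h, t, rfl⟩ := List.exists_cons_of_ne_nil hne
  obtain ⟨m, hm⟩ := Option.isSome_iff_exists.mp hsome
  simp only [List.headD_cons] at hm hall
  have hall' : ∀ g ∈ h :: t, pvIsoMol.lookup g = some m := fun g hg => (hall g hg).trans hm
  unfold Spec_validate_single_molecule_iso_list
  -- A side
  unfold validate_single_molecule_iso_list
  have hA : pvLoopA (h :: t) PySem.Set.empty = some [m] := by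
    simp only [pvLoopA, pv_scan_eq_lookup h m (hall' h (by simp))]
    have : PySem.Set.add PySem.Set.empty m = [m] := rfl
    rw [this]
    exact pv_loopA_const m t (fun g hg => hall' g (List.mem_cons_of_mem _ hg)) [m] (by simp)
  rw [hA]
  -- B side
  unfold validate_single_molecule_iso_list_alt
  have hBall : (h :: t).all (fun gid => pvRevIndex.contains gid) = true := by
    refine List.all_eq_true.mpr fun g hg => ?_
    rw [PySem.Dict.contains_eq_isSome_get?, pv_get_eq_lookup g m (hall' g hg)]; rfl
  have hmap : (h :: t).map (fun g => (pvRevIndex.get? g).getD "") = (h :: t).map (fun _ => m) := by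
    exact List.map_congr_left fun g hg => by rw [pv_get_eq_lookup g m (hall' g hg)]; rfl
  simp only [List.isEmpty_cons, Bool.false_eq_true, if_false, hBall, if_true, hmap,
    pv_ofList_const m (h :: t) (by simp), List.headD_cons,
    pv_get_eq_lookup h m (hall' h (by simp))]
  rfl
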